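-- pv_equiv track=rewrite | github.com/peeringdb/peeringdb | src/peeringdb_server/search.py | order_results_alphabetically
-- ===== SOURCE A (Python) =====
-- def order_results_alphabetically(result, search_terms, original_query=""):
--     """
--     Order the search results alphabetically and put the exact case-insensitive matches in front with special handling for OR queries.
--
--     Args:
--     - result: A dictionary containing categories and their search results
--     - search_terms: A list of search terms
--     - original_query: The original search query string (e.g. "Equinix OR FR5")
--
--     Returns:
--     - result: A dictionary containing the search results in alphabetical order.
--     """
--     # Check if this is an OR query
--     if " OR " in original_query:
--         # Get the term after OR
--         or_term = original_query.split(" OR ")[1].strip().lower()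
--
--     # Make sure the search terms are lower case
--     search_terms_lower = [term.lower() for term in search_terms]
--
--     # Add the search as a single string to the list of search terms
--     search_terms_lower.append(" ".join(search_terms_lower))
--
--     for category in result:
--         result[category] = sorted(result[category], key=lambda x: x["name"].lower())
--
--         if " OR " in original_query:
--             # Find items matching the OR term
--             or_matches = []
--             non_or_matches = []
--
--             for item in result[category]:
--                 if or_term in item["name"].lower():
--                     or_matches.append(item)
--                 else:
--                     non_or_matches.append(item)
--
--             # Reorder the list with OR matches first
--             result[category] = or_matches + non_or_matches
--         else:
--             exact_match_index = -1
--
--             for index, item in enumerate(result[category]):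
--                 if item["name"].lower() in search_terms_lower:
--                     exact_match_index = index
--                     break
--
--             if exact_match_index != -1:
--                 exact_match = result[category].pop(exact_match_index)
--                 result[category].insert(0, exact_match)
--
--     return result
-- ===== SOURCE B (Python) =====
-- def order_results_alphabetically(result, search_terms, original_query=""):
--     # One composite-key stable sort per category in the OR branch (no partition
--     # pass); slicing instead of pop/insert in the exact-match branch.
--     terms = [term.lower() for term in search_terms]
--     terms.append(" ".join(terms))
--
--     is_or = " OR " in original_query
--     if is_or:
--         or_term = original_query.split(" OR ")[1].strip().lower()
--
--     for category in result:
--         if is_or: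
--             # stable sort: non-matches after matches, alphabetical within each group
--             result[category] = sorted(
--                 result[category],
--                 key=lambda x: (or_term not in x["name"].lower(), x["name"].lower()),
--             )
--         else:
--             items = sorted(result[category], key=lambda x: x["name"].lower())
--             hit = next(
--                 (i for i, item in enumerate(items) if item["name"].lower() in terms),
--                 None,
--             )
--             if hit is not None:
--                 items = [items[hit]] + items[:hit] + items[hit + 1:]
--             result[category] = items
--
--     return result
-- ===== Notes on version B (the rewrite author's own statement) =====
-- stated objective: alternative
-- what changed: The OR branch's sort-then-partition (two accumulator lists) becomes one stable sort with the composite key (or_term not in name, name), and the exact-match branch's pop/insert mutation becomes slicing around the found index.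
import Mathlib
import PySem

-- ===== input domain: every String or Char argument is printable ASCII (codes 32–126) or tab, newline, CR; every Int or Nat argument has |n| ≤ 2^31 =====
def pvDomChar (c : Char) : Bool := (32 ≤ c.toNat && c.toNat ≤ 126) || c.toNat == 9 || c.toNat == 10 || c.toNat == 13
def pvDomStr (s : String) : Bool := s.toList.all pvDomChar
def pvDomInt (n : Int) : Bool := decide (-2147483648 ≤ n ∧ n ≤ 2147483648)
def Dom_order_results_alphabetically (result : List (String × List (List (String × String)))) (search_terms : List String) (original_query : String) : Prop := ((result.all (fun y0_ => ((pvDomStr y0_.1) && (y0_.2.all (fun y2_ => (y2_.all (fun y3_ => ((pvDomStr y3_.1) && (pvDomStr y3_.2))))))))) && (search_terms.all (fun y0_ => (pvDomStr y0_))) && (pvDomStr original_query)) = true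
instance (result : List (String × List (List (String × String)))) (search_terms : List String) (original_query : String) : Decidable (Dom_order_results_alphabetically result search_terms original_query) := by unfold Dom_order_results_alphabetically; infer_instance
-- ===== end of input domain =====

-- B replaces A's partition pass after the sort (OR branch) by one composite-key stable
-- sort, and the pop/insert promotion (exact-match branch) by list slicing; same results,
-- objective: alternative decomposition. Both Pythons mutate result in place; the
-- equivalence proved here is about the RETURN value.

-- item["name"].lower(); Pre_ guarantees the "name" key is present (Python raises KeyError otherwise)
def pvNameLower (item : List (String × String)) : String :=
  PySem.Str.lower ((List.lookup "name" item).getD "")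

-- ===== PORT A =====
def order_results_alphabetically (result : List (String × List (List (String × String)))) (search_terms : List String) (original_query : String) : List (String × List (List (String × String))) :=
  let or_term := PySem.Str.lower (PySem.Str.strip
      (PySem.List.pyGetD ((PySem.Str.split? original_query " OR ").getD []) 1 ""))
  let search_terms_lower := search_terms.map PySem.Str.lower
  let search_terms_lower := search_terms_lower ++ [PySem.Str.join " " search_terms_lower]
  result.map (fun cat =>
    let sortedItems := PySem.List.sorted cat.2 pvNameLower
    if PySem.Str.isIn " OR " original_query then
      let pr := sortedItems.foldl
        (fun (acc : List (List (String × String)) × List (List (String × String))) item =>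
          if PySem.Str.isIn or_term (pvNameLower item) then (acc.1 ++ [item], acc.2)
          else (acc.1, acc.2 ++ [item])) ([], [])
      (cat.1, pr.1 ++ pr.2)
    else
      match sortedItems.findIdx? (fun item => search_terms_lower.contains (pvNameLower item)) with
      | some idx =>
        match PySem.List.pop? sortedItems (idx : Int) with
        | some (x, rest) => (cat.1, PySem.List.insert rest 0 x)
        | none => (cat.1, sortedItems)
      | none => (cat.1, sortedItems))

-- ===== PORT B =====
def order_results_alphabetically_alt (result : List (String × List (List (String × String)))) (search_terms : List String) (original_query : String) : List (String × List (List (String × String))) :=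
  let terms := search_terms.map PySem.Str.lower
  let terms := terms ++ [PySem.Str.join " " terms]
  let is_or := PySem.Str.isIn " OR " original_query
  let or_term := PySem.Str.lower (PySem.Str.strip
      (PySem.List.pyGetD ((PySem.Str.split? original_query " OR ").getD []) 1 ""))
  result.map (fun cat =>
    if is_or then
      (cat.1, PySem.List.sorted2 cat.2
        (fun x => !PySem.Str.isIn or_term (pvNameLower x)) pvNameLower)
    else
      let items := PySem.List.sorted cat.2 pvNameLower
      match items.findIdx? (fun item => terms.contains (pvNameLower item)) with
      | some hit =>
        match items[hit]? with
        | some x => (cat.1, x :: (PySem.List.slice items none (some (hit : Int)) ++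
                                  PySem.List.slice items (some ((hit : Int) + 1)) none))
        | none => (cat.1, items)
      | none => (cat.1, items))

-- ===== PRECONDITION & SPEC =====
-- Pre_ excludes inputs where some item lacks the "name" key: there Python A (and B) raise KeyError.
def Pre_order_results_alphabetically (result : List (String × List (List (String × String)))) (search_terms : List String) (original_query : String) : Prop :=
  (result.all (fun cat => cat.2.all (fun item => (List.lookup "name" item).isSome))) = true
instance (result : List (String × List (List (String × String)))) (search_terms : List String) (original_query : String) : Decidable (Pre_order_results_alphabetically result search_terms original_query) := by unfold Pre_order_results_alphabetically; infer_instance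

def pvWitness_order_results_alphabetically : (List (String × List (List (String × String)))) × List String × String :=
  ([("net", [[("name", "Beta")], [("name", "alpha")]])], ["alpha"], "alpha")

def Spec_order_results_alphabetically (result : List (String × List (List (String × String)))) (search_terms : List String) (original_query : String) (out : List (String × List (List (String × String)))) : Prop := out = order_results_alphabetically_alt result search_terms original_query
instance (result : List (String × List (List (String × String)))) (search_terms : List String) (original_query : String) (out : List (String × List (List (String × String)))) : Decidable (Spec_order_results_alphabetically result search_terms original_query out) := by unfold Spec_order_results_alphabetically; infer_instance

-- ===== CLAIM (what is proved, stated in full; the proofs are below) =====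
def Claim_equal_order_results_alphabetically : Prop := ∀ (result : List (String × List (List (String × String)))) (search_terms : List String) (original_query : String), Dom_order_results_alphabetically result search_terms original_query → Pre_order_results_alphabetically result search_terms original_query → Spec_order_results_alphabetically result search_terms original_query (order_results_alphabetically result search_terms original_query)

-- ===== LEMMAS AND PROOFS =====

-- insertBy lands exactly between a prefix it refuses and a suffix it accepts
theorem pv_insertBy_middle {α : Type} (b : α → α → Bool) (x : α) (A C : List α)
    (hA : ∀ a ∈ A, b x a = false) (hC : ∀ hd tl, C = hd :: tl → b x hd = true) :
    PySem.List.insertBy b x (A ++ C) = A ++ x :: C := by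
  cases C with
  | nil =>
      simpa using PySem.List.insertBy_of_forall_not_before b x A (by simpa using hA)
  | cons hd tl =>
      induction A with
      | nil => simp [PySem.List.insertBy, hC hd tl rfl]
      | cons a A ih =>
          simp only [List.cons_append, PySem.List.insertBy, hA a (by simp), Bool.false_eq_true,
            if_false]
          simpa using ih (fun a ha => hA a (by simp [ha]))

-- in a key-sorted list, everything the dropWhile keeps is strictly above k x
theorem pv_mem_dropWhile_lt {α κ : Type} [LinearOrder κ] (k : α → κ) (x : α) (ys : List α)
    (h : ys.Pairwise (fun a b => k a ≤ k b)) :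
    ∀ b ∈ ys.dropWhile (fun a => !decide (k x < k a)), k x < k b := by
  induction ys with
  | nil => simp
  | cons y ys ih =>
      intro c hc
      by_cases hy : k x < k y
      · rw [List.dropWhile_cons_of_neg (by simp [hy])] at hc
        rcases List.mem_cons.mp hc with rfl | hc
        · exact hy
        · exact lt_of_lt_of_le hy ((List.pairwise_cons.mp h).1 c hc)
      · rw [List.dropWhile_cons_of_pos (by simp [hy])] at hc
        exact ih (List.pairwise_cons.mp h).2 c hc

-- one insertion step of the composite-key sort = filtered insertion into the plain sort
theorem pv_insert_step {α κ : Type} [LinearOrder κ] (p : α → Bool) (k : α → κ) (x : α)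
    (ys : List α) (h : ys.Pairwise (fun a b => k a ≤ k b)) :
    PySem.List.insertBy
        (fun a b => decide ((!p a) < (!p b)) || (!decide ((!p b) < (!p a)) && decide (k a < k b))) x
        (ys.filter p ++ ys.filter (fun a => !p a))
      = (PySem.List.insertBy (fun a b => decide (k a < k b)) x ys).filter p
        ++ (PySem.List.insertBy (fun a b => decide (k a < k b)) x ys).filter (fun a => !p a) := by
  set q : α → Bool := fun a => !decide (k x < k a) with hq
  have hAB : ys.takeWhile q ++ ys.dropWhile q = ys := List.takeWhile_append_dropWhile
  set A := ys.takeWhile q with hAdef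
  set B := ys.dropWhile q with hBdef
  have hA : ∀ a ∈ A, decide (k x < k a) = false := by
    intro a ha
    have := List.mem_takeWhile_imp ha
    simpa [hq] using this
  have hB : ∀ b ∈ B, decide (k x < k b) = true := by
    intro b hb
    simpa using pv_mem_dropWhile_lt k x ys h b hb
  have hRHS : PySem.List.insertBy (fun a b => decide (k a < k b)) x ys = A ++ x :: B := by
    rw [← hAB]
    exact pv_insertBy_middle _ x A B (fun a ha => hA a ha)
      (fun hd tl hEq => hB hd (by rw [hEq]; simp))
  rw [hRHS, ← hAB]
  cases hp : p x with
  | true =>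
      have lhs : PySem.List.insertBy
          (fun a b => decide ((!p a) < (!p b)) || (!decide ((!p b) < (!p a)) && decide (k a < k b))) x
          ((A ++ B).filter p ++ (A ++ B).filter (fun a => !p a))
          = A.filter p ++ x :: (B.filter p ++ (A.filter (fun a => !p a) ++ B.filter (fun a => !p a))) := by
        have := pv_insertBy_middle
          (fun a b => decide ((!p a) < (!p b)) || (!decide ((!p b) < (!p a)) && decide (k a < k b))) x
          (A.filter p) (B.filter p ++ (A.filter (fun a => !p a) ++ B.filter (fun a => !p a)))
          (by
            intro a ha
            have hpa : p a = true := (List.mem_filter.mp ha).2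
            have haA : a ∈ A := (List.mem_filter.mp ha).1
            simp [hp, hpa, hA a haA])
          (by
            intro hd tl hEq
            have hmem : hd ∈ B.filter p ++ (A.filter (fun a => !p a) ++ B.filter (fun a => !p a)) := by
              rw [hEq]; simp
            rcases List.mem_append.mp hmem with h1 | h2
            · have hphd : p hd = true := (List.mem_filter.mp h1).2
              have : hd ∈ B := (List.mem_filter.mp h1).1
              simp [hp, hphd, hB hd this]
            · rcases List.mem_append.mp h2 with h3 | h3
              · have hphd : (!p hd) = true := (List.mem_filter.mp h3).2
                simp [hp, hphd]
              · have hphd : (!p hd) = true := (List.mem_filter.mp h3).2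
                simp [hp, hphd])
        simpa [List.filter_append, List.append_assoc] using this
      rw [lhs]
      simp [List.filter_append, hp]
  | false =>
      have lhs : PySem.List.insertBy
          (fun a b => decide ((!p a) < (!p b)) || (!decide ((!p b) < (!p a)) && decide (k a < k b))) x
          ((A ++ B).filter p ++ (A ++ B).filter (fun a => !p a))
          = (A.filter p ++ B.filter p ++ A.filter (fun a => !p a)) ++ x :: B.filter (fun a => !p a) := by
        have := pv_insertBy_middle
          (fun a b => decide ((!p a) < (!p b)) || (!decide ((!p b) < (!p a)) && decide (k a < k b))) x
          (A.filter p ++ B.filter p ++ A.filter (fun a => !p a)) (B.filter (fun a => !p a))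
          (by
            intro a ha
            rcases List.mem_append.mp ha with h1 | h3
            · rcases List.mem_append.mp h1 with h2 | h2
              · have hpa : p a = true := (List.mem_filter.mp h2).2
                simp [hp, hpa]
              · have hpa : p a = true := (List.mem_filter.mp h2).2
                simp [hp, hpa]
            · have hpa : (!p a) = true := (List.mem_filter.mp h3).2
              have haA : a ∈ A := (List.mem_filter.mp h3).1
              simp [hp, hpa, hA a haA])
          (by
            intro hd tl hEq
            have hmem : hd ∈ B.filter (fun a => !p a) := by rw [hEq]; simp
            have hphd : (!p hd) = true := (List.mem_filter.mp hmem).2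
            have : hd ∈ B := (List.mem_filter.mp hmem).1
            simp [hp, hphd, hB hd this])
        simpa [List.filter_append, List.append_assoc] using this
      rw [lhs]
      simp [List.filter_append, hp, List.append_assoc]

-- sorted grows one element at a time
theorem pv_sorted_snoc {α κ : Type} [LT κ] [DecidableLT κ] (ws : List α) (x : α) (k : α → κ) :
    PySem.List.sorted (ws ++ [x]) k
      = PySem.List.insertBy (fun a b => decide (k a < k b)) x (PySem.List.sorted ws k) := by
  rw [PySem.List.sorted_eq_foldl_insertBy, PySem.List.sorted_eq_foldl_insertBy, List.foldl_append]
  simp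

theorem pv_fold_partition {α κ : Type} [LinearOrder κ] (p : α → Bool) (k : α → κ) :
    ∀ (l ws : List α),
      List.foldl (fun acc x => PySem.List.insertBy
          (fun a b => decide ((!p a) < (!p b)) || (!decide ((!p b) < (!p a)) && decide (k a < k b))) x acc)
        ((PySem.List.sorted ws k).filter p ++ (PySem.List.sorted ws k).filter (fun a => !p a)) l
      = (PySem.List.sorted (ws ++ l) k).filter p
        ++ (PySem.List.sorted (ws ++ l) k).filter (fun a => !p a) := by
  intro l
  induction l with
  | nil => intro ws; simp
  | cons x l ih =>
      intro ws
      rw [List.foldl_cons, pv_insert_step p k x _ (PySem.List.sorted_pairwise ws k),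
        ← pv_sorted_snoc, ih (ws ++ [x])]
      simp

-- the composite-key stable sort IS sort-then-stable-partition
theorem pv_sorted2_partition {α κ : Type} [LinearOrder κ] (p : α → Bool) (k : α → κ) (l : List α) :
    PySem.List.sorted2 l (fun x => !p x) k
      = (PySem.List.sorted l k).filter p ++ (PySem.List.sorted l k).filter (fun a => !p a) := by
  have h := pv_fold_partition p k l []
  simpa [PySem.List.sorted2, PySem.List.sorted] using h

-- A's pair-accumulator partition loop computes the two filters
theorem pv_foldl_partition_pair {α : Type} (p : α → Bool) :
    ∀ (l : List α) (a b : List α),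
      l.foldl (fun acc it => if p it then (acc.1 ++ [it], acc.2) else (acc.1, acc.2 ++ [it])) (a, b)
        = (a ++ l.filter p, b ++ l.filter (fun x => !p x)) := by
  intro l
  induction l with
  | nil => intro a b; simp
  | cons x l ih =>
      intro a b
      cases hx : p x <;> simp [hx, ih]

-- pop(i) returns the indexed element and the remainder
theorem pv_pop_eq {α : Type} (s : List α) (i : ℕ) (hi : i < s.length) :
    PySem.List.pop? s (i : Int) = some (s[i], s.eraseIdx i) := by
  have hpy : PySem.List.pyIdx? s.length (i : Int) = some i := by
    simp [PySem.List.pyIdx?, hi]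
  simp [PySem.List.pop?, hpy, List.getElem?_eq_getElem hi]

-- insert(0, s[i]) after the pop  =  [s[i]] + s[:i] + s[i+1:]
theorem pv_promote_lists {α : Type} (s : List α) (i : ℕ) (hi : i < s.length) :
    PySem.List.insert (s.eraseIdx i) 0 s[i]
      = s[i] :: (PySem.List.slice s none (some (i : Int)) ++
                 PySem.List.slice s (some ((i : Int) + 1)) none) := by
  have hins : PySem.List.insert (s.eraseIdx i) 0 s[i] = s[i] :: s.eraseIdx i := by
    simp [PySem.List.insert, PySem.List.sliceIndices]
  have hslice1 : PySem.List.slice s none (some (i : Int)) = s.take i := by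
    rw [PySem.List.slice_to s (by positivity)]; simp
  have hslice2 : PySem.List.slice s (some ((i : Int) + 1)) none = s.drop (i + 1) := by
    rw [PySem.List.slice_from s (by positivity)]
    norm_num [Int.toNat_natCast]
  rw [hins, hslice1, hslice2, List.eraseIdx_eq_take_drop_succ]

-- ===== VERDICT (by name: the statement is the Claim_ definition above) =====
theorem order_results_alphabetically_spec : Claim_equal_order_results_alphabetically := by
  unfold Claim_equal_order_results_alphabetically
  intro result search_terms original_query _ _
  unfold Spec_order_results_alphabetically
  unfold order_results_alphabetically order_results_alphabetically_alt
  apply List.map_congr_left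
  intro cat _
  cases hOr : PySem.Str.isIn " OR " original_query with
  | true =>
      simp only [if_true]
      rw [pv_foldl_partition_pair]
      simp [pv_sorted2_partition]
  | false =>
      simp only [Bool.false_eq_true, if_false]
      cases hf : (PySem.List.sorted cat.2 pvNameLower).findIdx?
          (fun item =>
            ((search_terms.map PySem.Str.lower) ++
              [PySem.Str.join " " (search_terms.map PySem.Str.lower)]).contains (pvNameLower item)) with
      | none => simp
      | some i =>
          have hi : i < (PySem.List.sorted cat.2 pvNameLower).length :=
            (List.findIdx?_eq_some_iff_findIdx_eq.mp hf).1
          simp only [pv_pop_eq _ i hi, List.getElem?_eq_getElem hi]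
          rw [pv_promote_lists _ i hi]
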